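-- pv_equiv track=rewrite | github.com/paulozava/exerciscm | python/grains/grains.py | total_after
-- ===== SOURCE A (Python) =====
-- def total_after(square_number):
--     if not (0 < square_number < 65):
--         raise ValueError('Value impossible')
--     square_acc, square_grain = 0, 1
--     for _ in range(square_number):
--         square_grain *= 2
--         square_acc += square_grain
--     return square_grain
-- ===== SOURCE B (Python) =====
-- def total_after(square_number):
--     if not (0 < square_number < 65):
--         raise ValueError('Value impossible')
--     return 2 ** square_number
-- ===== Notes on version B (the rewrite author's own statement) =====
-- stated objective: simpler
-- what changed: Replaces the iterative doubling loop (and its unused accumulator) with the closed form 2 ** square_number under the same guard.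
import Mathlib
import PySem

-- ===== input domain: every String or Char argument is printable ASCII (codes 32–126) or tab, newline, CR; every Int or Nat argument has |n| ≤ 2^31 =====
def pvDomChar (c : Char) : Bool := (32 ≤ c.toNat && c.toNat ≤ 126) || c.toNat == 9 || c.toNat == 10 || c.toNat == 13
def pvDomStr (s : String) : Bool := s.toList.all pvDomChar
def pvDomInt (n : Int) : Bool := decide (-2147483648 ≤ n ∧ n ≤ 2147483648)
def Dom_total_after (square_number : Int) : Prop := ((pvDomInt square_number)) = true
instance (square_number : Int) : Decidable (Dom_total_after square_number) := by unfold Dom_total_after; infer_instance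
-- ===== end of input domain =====

-- B replaces A's doubling loop with the closed form 2 ** square_number (simpler; same guard, so same domain).


-- ===== PORT A =====
-- loop state (square_acc, square_grain); each step: grain *= 2 then acc += grain; returns grain
def total_after (square_number : Int) : Int :=
  ((PySem.List.pyRange 0 square_number 1).foldl
    (fun (p : Int × Int) _ => (p.1 + p.2 * 2, p.2 * 2)) (0, 1)).2

-- ===== PORT B =====
def total_after_alt (square_number : Int) : Int :=
  2 ^ square_number.toNat

-- ===== PRECONDITION & SPEC =====
-- the Python guard: both programs raise ValueError unless 0 < square_number < 65
def Pre_total_after (square_number : Int) : Prop := 0 < square_number ∧ square_number < 65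
instance (square_number : Int) : Decidable (Pre_total_after square_number) := by unfold Pre_total_after; infer_instance
def pvWitness_total_after : Int := (7)
def Spec_total_after (square_number : Int) (out : Int) : Prop := out = total_after_alt square_number
instance (square_number : Int) (out : Int) : Decidable (Spec_total_after square_number out) := by unfold Spec_total_after; infer_instance

-- ===== CLAIM (what is proved, stated in full; the proofs are below) =====
def Claim_equal_total_after : Prop := ∀ (square_number : Int), Dom_total_after square_number → Pre_total_after square_number → Spec_total_after square_number (total_after square_number)

-- ===== LEMMAS AND PROOFS =====
-- the grain component of A's fold: doubling once per list element
theorem pv_fold_snd (l : List Int) (a g : Int) :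
    (l.foldl (fun (p : Int × Int) _ => (p.1 + p.2 * 2, p.2 * 2)) (a, g)).2 = g * 2 ^ l.length := by
  induction l generalizing a g with
  | nil => simp
  | cons x xs ih => simp [List.foldl, ih, pow_succ]; ring

-- ===== VERDICT (by name: the statement is the Claim_ definition above) =====
theorem total_after_spec : Claim_equal_total_after := by
  intro n _ _
  unfold Spec_total_after total_after total_after_alt
  rw [pv_fold_snd, PySem.List.length_pyRange_one]
  simp
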